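-- pv_equiv track=rewrite | github.com/Rocketknight1/IMRNN | movie_parsing.py | ChopTitle
-- ===== SOURCE A (Python) =====
-- def ChopTitle(title,max_len,char_to_index,end_index,min_size):
-- 	#Returns all training cases that can be produced from a single title
--     training = []
--     title_indices = [char_to_index[char] for char in title]
--     title_indices.append(end_index)
--     start_char = 0
--     target_char = min_size
--     while target_char <= len(title_indices):
--         training.append(title_indices[start_char:target_char])
--         target_char+=1
--         if target_char - start_char > max_len:
--             start_char+=1
--     return training
-- ===== SOURCE B (Python) =====
-- def ChopTitle(title, max_len, char_to_index, end_index, min_size):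
--     # Two-phase decomposition: first the growing prefixes (window start pinned at 0),
--     # then the fixed-width sliding windows, instead of A's stateful start/target loop.
--     idx = [char_to_index[c] for c in title]
--     idx.append(end_index)
--     n = len(idx)
--     k = max(max_len, min_size)
--     training = [idx[:t] for t in range(min_size, min(k, n) + 1)]
--     for t in range(max(min_size, k + 1), n + 1):
--         training.append(idx[t - k:t])
--     return training
-- ===== Notes on version B (the rewrite author's own statement) =====
-- stated objective: alternative
-- what changed: Replaces A's single stateful while-loop with a conditionally-advanced start pointer by a two-phase generation: first the growing prefixes idx[:t] (window start pinned at 0), then the fixed-width sliding windows idx[t-k:t] with k = max(max_len, min_size); concatenating the phases yields the identical sequence.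
import Mathlib
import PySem

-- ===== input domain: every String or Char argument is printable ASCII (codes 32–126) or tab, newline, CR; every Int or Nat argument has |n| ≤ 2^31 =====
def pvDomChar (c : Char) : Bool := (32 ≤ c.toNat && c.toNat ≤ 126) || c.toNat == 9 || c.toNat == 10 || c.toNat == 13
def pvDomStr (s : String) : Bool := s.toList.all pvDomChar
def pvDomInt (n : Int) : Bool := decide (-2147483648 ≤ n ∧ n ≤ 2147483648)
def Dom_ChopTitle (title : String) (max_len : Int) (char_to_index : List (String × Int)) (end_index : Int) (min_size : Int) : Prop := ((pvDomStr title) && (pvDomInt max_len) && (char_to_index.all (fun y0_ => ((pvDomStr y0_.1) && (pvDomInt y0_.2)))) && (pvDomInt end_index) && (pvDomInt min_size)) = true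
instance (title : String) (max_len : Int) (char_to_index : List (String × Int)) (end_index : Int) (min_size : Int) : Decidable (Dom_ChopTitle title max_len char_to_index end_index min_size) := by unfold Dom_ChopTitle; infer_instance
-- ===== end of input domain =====

-- ===== PORT A =====
-- Header: B generates the output in two phases — growing prefixes, then fixed-width
-- sliding windows — instead of A's stateful start/target while-loop (objective: alternative).
-- while-loop of A, transliterated; terminates since len(tis)+1 - target_char decreases
def pvChopLoop (tis : List Int) (max_len : Int) (training : List (List Int)) (start_char target_char : Int) : List (List Int) :=
  if target_char ≤ (tis.length : Int) then
    pvChopLoop tis max_len (training ++ [PySem.List.slice tis (some start_char) (some target_char)])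
      (if target_char + 1 - start_char > max_len then start_char + 1 else start_char)
      (target_char + 1)
  else training
termination_by ((tis.length : Int) + 1 - target_char).toNat
decreasing_by omega

def ChopTitle (title : String) (max_len : Int) (char_to_index : List (String × Int)) (end_index : Int) (min_size : Int) : List (List Int) :=
  let d := PySem.Dict.ofList char_to_index
  let title_indices := title.toList.map (fun ch => PySem.Dict.getD d (String.ofList [ch]) 0) ++ [end_index]
  pvChopLoop title_indices max_len [] 0 min_size

-- ===== PORT B =====
def ChopTitle_alt (title : String) (max_len : Int) (char_to_index : List (String × Int)) (end_index : Int) (min_size : Int) : List (List Int) :=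
  let d := PySem.Dict.ofList char_to_index
  let idx := title.toList.map (fun ch => PySem.Dict.getD d (String.ofList [ch]) 0) ++ [end_index]
  let n : Int := idx.length
  let k := max max_len min_size
  let training := (PySem.List.pyRange min_size (min k n + 1) 1).map
    (fun t => PySem.List.slice idx none (some t))
  (PySem.List.pyRange (max min_size (k + 1)) (n + 1) 1).foldl
    (fun acc t => acc ++ [PySem.List.slice idx (some (t - k)) (some t)]) training

-- ===== PRECONDITION & SPEC =====
-- Pre_ excludes exactly the inputs where Python A raises KeyError: a title character absent
-- from char_to_index (B raises there too).
def Pre_ChopTitle (title : String) (max_len : Int) (char_to_index : List (String × Int)) (end_index : Int) (min_size : Int) : Prop :=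
  (title.toList.all (fun ch => (PySem.Dict.ofList char_to_index).contains (String.ofList [ch]))) = true
instance (title : String) (max_len : Int) (char_to_index : List (String × Int)) (end_index : Int) (min_size : Int) : Decidable (Pre_ChopTitle title max_len char_to_index end_index min_size) := by unfold Pre_ChopTitle; infer_instance

def pvWitness_ChopTitle : String × Int × (List (String × Int)) × Int × Int :=
  ("ab", 3, [("a", 1), ("b", 2), ("c", 3)], 0, 1)

def Spec_ChopTitle (title : String) (max_len : Int) (char_to_index : List (String × Int)) (end_index : Int) (min_size : Int) (out : List (List Int)) : Prop := out = ChopTitle_alt title max_len char_to_index end_index min_size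
instance (title : String) (max_len : Int) (char_to_index : List (String × Int)) (end_index : Int) (min_size : Int) (out : List (List Int)) : Decidable (Spec_ChopTitle title max_len char_to_index end_index min_size out) := by unfold Spec_ChopTitle; infer_instance

-- ===== CLAIM (what is proved, stated in full; the proofs are below) =====
def Claim_equal_ChopTitle : Prop := ∀ (title : String) (max_len : Int) (char_to_index : List (String × Int)) (end_index : Int) (min_size : Int), Dom_ChopTitle title max_len char_to_index end_index min_size → Pre_ChopTitle title max_len char_to_index end_index min_size → Spec_ChopTitle title max_len char_to_index end_index min_size (ChopTitle title max_len char_to_index end_index min_size)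

-- ===== LEMMAS AND PROOFS =====
-- Invariant of A's loop: start_char is always max 0 (min (target - max_len) (target - min_size)).
lemma pvChopLoop_eq (tis : List Int) (M m : Int) :
    ∀ (n : Nat) (training : List (List Int)) (s t : Int),
      ((tis.length : Int) + 1 - t).toNat ≤ n →
      m ≤ t →
      s = max 0 (min (t - M) (t - m)) →
      pvChopLoop tis M training s t =
        training ++ (PySem.List.pyRange t ((tis.length : Int) + 1) 1).map
          (fun u => PySem.List.slice tis (some (max 0 (min (u - M) (u - m)))) (some u)) := by
  intro n
  induction n with
  | zero =>
    intro training s t hn hm hs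
    have ht : ¬ t ≤ (tis.length : Int) := by omega
    rw [pvChopLoop, if_neg ht, PySem.List.pyRange_one_eq_nil (by omega)]
    simp
  | succ n ih =>
    intro training s t hn hm hs
    by_cases ht : t ≤ (tis.length : Int)
    · rw [pvChopLoop, if_pos ht, PySem.List.pyRange_one_cons (by omega), List.map_cons]
      rw [ih _ _ _ (by omega) (by omega) (by split_ifs with hc <;> omega)]
      simp [hs]
    · rw [pvChopLoop, if_neg ht, PySem.List.pyRange_one_eq_nil (by omega)]
      simp

-- B's foldl-append loop is a map appended to the accumulator.
lemma foldl_append_map (l : List Int) (f : Int → List Int) :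
    ∀ (init : List (List Int)),
      l.foldl (fun acc t => acc ++ [f t]) init = init ++ l.map f := by
  induction l with
  | nil => intro init; simp
  | cons x xs ih => intro init; simp [List.foldl_cons, ih]

-- ===== VERDICT (by name: the statement is the Claim_ definition above) =====
theorem ChopTitle_spec : Claim_equal_ChopTitle := by
  intro title max_len char_to_index end_index min_size _ _
  unfold Spec_ChopTitle ChopTitle ChopTitle_alt
  set idx := title.toList.map
    (fun ch => PySem.Dict.getD (PySem.Dict.ofList char_to_index) (String.ofList [ch]) 0) ++ [end_index] with hidx
  set M := max_len
  set m := min_size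
  set n : Int := (idx.length : Int) with hn
  set k := max M m with hk
  rw [pvChopLoop_eq idx M m _ [] 0 m le_rfl le_rfl (by omega), List.nil_append,
      foldl_append_map]
  have hsplit : PySem.List.pyRange m (n + 1) 1 =
      PySem.List.pyRange m (min k n + 1) 1 ++ PySem.List.pyRange (max m (k + 1)) (n + 1) 1 := by
    by_cases hkn : k ≤ n
    · have h1 : min k n + 1 = k + 1 := by omega
      have h2 : max m (k + 1) = k + 1 := by omega
      rw [h1, h2]
      exact PySem.List.pyRange_one_append m (k + 1) (n + 1) (by omega) (by omega)
    · have h1 : min k n + 1 = n + 1 := by omega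
      rw [h1, PySem.List.pyRange_one_eq_nil (a := max m (k + 1)) (by omega), List.append_nil]
  rw [hsplit, List.map_append]
  congr 1
  · apply List.map_congr_left
    intro t htmem
    rw [PySem.List.mem_pyRange_one] at htmem
    have h0 : max 0 (min (t - M) (t - m)) = 0 := by omega
    rw [h0]
    exact PySem.List.slice_zero_start idx (some t)
  · apply List.map_congr_left
    intro t htmem
    rw [PySem.List.mem_pyRange_one] at htmem
    have h0 : max 0 (min (t - M) (t - m)) = t - k := by omega
    rw [h0]
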